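-- pv_equiv track=rewrite | github.com/eggsacc/CS1010X-2025 | Practical exam/PE 2023/template.py | count_bugles
-- ===== SOURCE A (Python) =====
-- def count_bugles(n, m):
--     regular = 0
--     size = 1
--     while size < n and size < m:
--         regular += (n - size) * (m - size) * 4
--         size += 1
--
--     extended = 0
--     size = 2
--     while size < n and size < m:
--         extended += (n - size) * (m - size) * 4
--         size += 2
--
--     size = 2
--     while size < n and size < m:
--         extended += (n - size) * 2 + (m - size) * 2
--         size += 2
--
--     if(n >= 5):
--         for i in range(5, n + 1, 2):
--             extended += (m - i // 2) * 2
--     if(m >= 5):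
--         for i in range(5, m + 1, 2):
--             extended += (n - i // 2) * 2
--
--     return regular + extended
-- ===== SOURCE B (Python) =====
-- def count_bugles(n, m):
--     # O(1) closed form: every loop of the original is an arithmetic/square-sum series.
--     def tri(k):
--         return k * (k + 1) // 2
--     def sqsum(k):
--         return k * (k + 1) * (2 * k + 1) // 6
--     t = min(n, m)
--     K = max(t - 1, 0)                 # step-1 loop runs for size = 1 .. K
--     J = max((t - 1) // 2, 0)          # step-2 loops run for size = 2j, j = 1 .. J
--     total = 4 * (K * n * m - (n + m) * tri(K) + sqsum(K))
--     total += 4 * (J * n * m - 2 * (n + m) * tri(J) + 4 * sqsum(J))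
--     total += 2 * (n + m) * J - 8 * tri(J)
--     if n >= 5:
--         k = (n - 1) // 2              # odd i = 5 .. n contribute 2*(m - i//2), i//2 = 2 .. k
--         total += 2 * (m * (k - 1) - (tri(k) - 1))
--     if m >= 5:
--         k = (m - 1) // 2
--         total += 2 * (n * (k - 1) - (tri(k) - 1))
--     return total
-- ===== Notes on version B (the rewrite author's own statement) =====
-- stated objective: faster
-- what changed: Replaced A's four O(n+m) accumulation loops by O(1) closed-form expressions using the triangular-number and square-pyramidal-number identities (k(k+1)/2 and k(k+1)(2k+1)/6).
import Mathlib
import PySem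

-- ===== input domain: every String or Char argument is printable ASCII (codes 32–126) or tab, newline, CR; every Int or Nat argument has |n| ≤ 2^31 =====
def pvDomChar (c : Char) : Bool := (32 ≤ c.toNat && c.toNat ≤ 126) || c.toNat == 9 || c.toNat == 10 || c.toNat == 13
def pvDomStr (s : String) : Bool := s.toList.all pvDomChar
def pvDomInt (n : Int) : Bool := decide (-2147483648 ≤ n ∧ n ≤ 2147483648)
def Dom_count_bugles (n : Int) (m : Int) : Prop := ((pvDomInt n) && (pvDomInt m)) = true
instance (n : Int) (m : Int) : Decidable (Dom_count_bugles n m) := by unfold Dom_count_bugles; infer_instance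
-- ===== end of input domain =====

-- B replaces A's four loops by O(1) closed-form arithmetic/square-sum series (exact same value).

-- ===== PORT A =====
-- the while loops, as structural recursion on a fuel that is large enough for every run
-- while size < n and size < m: regular += (n-size)*(m-size)*4; size += 1
def pvLoop1 (n m : Int) : Nat → Int → Int → Int
  | 0, _, acc => acc
  | fuel + 1, size, acc =>
    if size < n ∧ size < m then pvLoop1 n m fuel (size + 1) (acc + (n - size) * (m - size) * 4)
    else acc

-- while size < n and size < m: extended += (n-size)*(m-size)*4; size += 2
def pvLoop2 (n m : Int) : Nat → Int → Int → Int
  | 0, _, acc => acc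
  | fuel + 1, size, acc =>
    if size < n ∧ size < m then pvLoop2 n m fuel (size + 2) (acc + (n - size) * (m - size) * 4)
    else acc

-- while size < n and size < m: extended += (n-size)*2 + (m-size)*2; size += 2
def pvLoop3 (n m : Int) : Nat → Int → Int → Int
  | 0, _, acc => acc
  | fuel + 1, size, acc =>
    if size < n ∧ size < m then pvLoop3 n m fuel (size + 2) (acc + ((n - size) * 2 + (m - size) * 2))
    else acc

def count_bugles (n : Int) (m : Int) : Int :=
  let regular := pvLoop1 n m (min n m - 1).toNat 1 0
  let extended := pvLoop2 n m (min n m - 2).toNat 2 0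
  let extended := pvLoop3 n m (min n m - 2).toNat 2 extended
  let extended :=
    if 5 ≤ n then
      (PySem.List.pyRange 5 (n + 1) 2).foldl
        (fun acc i => acc + (m - PySem.Int.floordiv i 2) * 2) extended
    else extended
  let extended :=
    if 5 ≤ m then
      (PySem.List.pyRange 5 (m + 1) 2).foldl
        (fun acc i => acc + (n - PySem.Int.floordiv i 2) * 2) extended
    else extended
  regular + extended

-- ===== PORT B =====
-- tri(k) = k*(k+1)//2
def pvTri (k : Int) : Int := PySem.Int.floordiv (k * (k + 1)) 2
-- sqsum(k) = k*(k+1)*(2*k+1)//6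
def pvSqsum (k : Int) : Int := PySem.Int.floordiv (k * (k + 1) * (2 * k + 1)) 6

def count_bugles_alt (n : Int) (m : Int) : Int :=
  let t := min n m
  let K := max (t - 1) 0
  let J := max (PySem.Int.floordiv (t - 1) 2) 0
  let total := 4 * (K * n * m - (n + m) * pvTri K + pvSqsum K)
  let total := total + 4 * (J * n * m - 2 * (n + m) * pvTri J + 4 * pvSqsum J)
  let total := total + (2 * (n + m) * J - 8 * pvTri J)
  let total :=
    if 5 ≤ n then
      let k := PySem.Int.floordiv (n - 1) 2
      total + 2 * (m * (k - 1) - (pvTri k - 1))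
    else total
  let total :=
    if 5 ≤ m then
      let k := PySem.Int.floordiv (m - 1) 2
      total + 2 * (n * (k - 1) - (pvTri k - 1))
    else total
  total

-- ===== PRECONDITION & SPEC =====
def Spec_count_bugles (n : Int) (m : Int) (out : Int) : Prop := out = count_bugles_alt n m
instance (n : Int) (m : Int) (out : Int) : Decidable (Spec_count_bugles n m out) := by unfold Spec_count_bugles; infer_instance

-- ===== CLAIM (what is proved, stated in full; the proofs are below) =====
def Claim_equal_count_bugles : Prop := ∀ (n : Int) (m : Int), Dom_count_bugles n m → Spec_count_bugles n m (count_bugles n m)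

-- ===== LEMMAS AND PROOFS =====

lemma pv_two_tri (k : Int) : 2 * pvTri k = k * (k + 1) := by
  unfold pvTri
  rw [PySem.Int.floordiv_eq_ediv_of_pos (by norm_num : (0:Int) < 2)]
  exact Int.mul_ediv_cancel' (Int.even_mul_succ_self k).two_dvd

lemma pv_six_sqsum (k : Int) : 6 * pvSqsum k = k * (k + 1) * (2 * k + 1) := by
  have hdvd : (6:Int) ∣ k * (k + 1) * (2 * k + 1) := by
    have hk : k = 6 * (k / 6) + k % 6 := by omega
    have h6 : k % 6 = 0 ∨ k % 6 = 1 ∨ k % 6 = 2 ∨ k % 6 = 3 ∨ k % 6 = 4 ∨ k % 6 = 5 := by omega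
    set q := k / 6 with hq
    rcases h6 with h | h | h | h | h | h <;> rw [hk, h]
    · exact ⟨q * (6*q + 1) * (12*q + 1), by ring⟩
    · exact ⟨(6*q + 1) * (3*q + 1) * (4*q + 1), by ring⟩
    · exact ⟨(3*q + 1) * (2*q + 1) * (12*q + 5), by ring⟩
    · exact ⟨(2*q + 1) * (3*q + 2) * (12*q + 7), by ring⟩
    · exact ⟨(3*q + 2) * (6*q + 5) * (4*q + 3), by ring⟩
    · exact ⟨(6*q + 5) * (q + 1) * (12*q + 11), by ring⟩
  unfold pvSqsum
  rw [PySem.Int.floordiv_eq_ediv_of_pos (by norm_num : (0:Int) < 6)]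
  exact Int.mul_ediv_cancel' hdvd

lemma pvLoop1_eq (n m : Int) : ∀ (j : Nat), ∀ (fuel : Nat) (s a : Int),
    min n m ≤ s + j →
    (j = 0 ∨ s + (j:Int) - 1 < min n m) →
    j ≤ fuel →
    12 * pvLoop1 n m fuel s a
      = 12 * a + 48 * j * (n - s) * (m - s) - 24 * (n + m - 2*s) * j * ((j:Int) - 1)
        + 8 * ((j:Int) - 1) * j * (2*j - 1) := by
  intro j
  induction j with
  | zero =>
      intro fuel s a h1 _ _
      cases fuel with
      | zero => simp only [pvLoop1]; push_cast; ring
      | succ f =>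
          simp only [pvLoop1]
          rw [if_neg (by push_cast at h1; omega)]
          push_cast; ring
  | succ k ih =>
      intro fuel s a h1 h2 hf
      have h2' : s + ((k:Int) + 1) - 1 < min n m := by
        rcases h2 with h2 | h2
        · exact absurd h2 (Nat.succ_ne_zero k)
        · push_cast at h2; exact h2
      obtain ⟨f, rfl⟩ : ∃ f, fuel = f + 1 := ⟨fuel - 1, by omega⟩
      simp only [pvLoop1]
      rw [if_pos (by omega)]
      rw [ih f (s + 1) _ (by push_cast at h1 ⊢; omega)
            (by rcases Nat.eq_zero_or_pos k with hk | hk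
                · exact Or.inl hk
                · right; omega) (by omega)]
      push_cast; ring

lemma pvLoop2_eq (n m : Int) : ∀ (j : Nat), ∀ (fuel : Nat) (s a : Int),
    min n m ≤ s + 2 * j →
    (j = 0 ∨ s + 2 * (j:Int) - 2 < min n m) →
    j ≤ fuel →
    12 * pvLoop2 n m fuel s a
      = 12 * a + 48 * j * (n - s) * (m - s) - 48 * (n + m - 2*s) * j * ((j:Int) - 1)
        + 32 * ((j:Int) - 1) * j * (2*j - 1) := by
  intro j
  induction j with
  | zero =>
      intro fuel s a h1 _ _
      cases fuel with
      | zero => simp only [pvLoop2]; push_cast; ring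
      | succ f =>
          simp only [pvLoop2]
          rw [if_neg (by push_cast at h1; omega)]
          push_cast; ring
  | succ k ih =>
      intro fuel s a h1 h2 hf
      have h2' : s + 2 * ((k:Int) + 1) - 2 < min n m := by
        rcases h2 with h2 | h2
        · exact absurd h2 (Nat.succ_ne_zero k)
        · push_cast at h2; exact h2
      obtain ⟨f, rfl⟩ : ∃ f, fuel = f + 1 := ⟨fuel - 1, by omega⟩
      simp only [pvLoop2]
      rw [if_pos (by omega)]
      rw [ih f (s + 2) _ (by push_cast at h1 ⊢; omega)
            (by rcases Nat.eq_zero_or_pos k with hk | hk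
                · exact Or.inl hk
                · right; omega) (by omega)]
      push_cast; ring

lemma pvLoop3_eq (n m : Int) : ∀ (j : Nat), ∀ (fuel : Nat) (s a : Int),
    min n m ≤ s + 2 * j →
    (j = 0 ∨ s + 2 * (j:Int) - 2 < min n m) →
    j ≤ fuel →
    pvLoop3 n m fuel s a = a + 2 * j * (n + m - 2*s) - 4 * j * ((j:Int) - 1) := by
  intro j
  induction j with
  | zero =>
      intro fuel s a h1 _ _
      cases fuel with
      | zero => simp only [pvLoop3]; push_cast; ring
      | succ f =>
          simp only [pvLoop3]
          rw [if_neg (by push_cast at h1; omega)]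
          push_cast; ring
  | succ k ih =>
      intro fuel s a h1 h2 hf
      have h2' : s + 2 * ((k:Int) + 1) - 2 < min n m := by
        rcases h2 with h2 | h2
        · exact absurd h2 (Nat.succ_ne_zero k)
        · push_cast at h2; exact h2
      obtain ⟨f, rfl⟩ : ∃ f, fuel = f + 1 := ⟨fuel - 1, by omega⟩
      simp only [pvLoop3]
      rw [if_pos (by omega)]
      rw [ih f (s + 2) _ (by push_cast at h1 ⊢; omega)
            (by rcases Nat.eq_zero_or_pos k with hk | hk
                · exact Or.inl hk
                · right; omega) (by omega)]
      push_cast; ring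

-- closed form of the 'for i in range(a, b, 2)' fold, a = 2c+1 odd, over an explicit range length
lemma pvFold4_eq (w a c : Int) (hc : a = 2 * c + 1) : ∀ (L : Nat) (acc : Int),
    (List.map (fun (k : Nat) => a + 2 * (k:Int)) (List.range L)).foldl
        (fun ac i => ac + (w - i / 2) * 2) acc
      = acc + 2 * L * w - 2 * L * c - L * ((L:Int) - 1) := by
  subst hc
  intro L
  induction L with
  | zero => intro acc; simp
  | succ k ih =>
      intro acc
      rw [List.range_succ, List.map_append, List.foldl_append, ih]
      have hdiv : (2 * c + 1 + 2 * (k:Int)) / 2 = c + k := by omega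
      simp only [List.map_cons, List.map_nil, List.foldl_cons, List.foldl_nil, hdiv]
      push_cast; ring

lemma pv_count_eq (n m : Int) : count_bugles n m = count_bugles_alt n m := by
  refine mul_left_cancel₀ (a := (12:Int)) (by norm_num) ?_
  simp only [count_bugles, count_bugles_alt]
  simp only [PySem.Int.floordiv_eq_ediv_of_pos (by norm_num : (0:Int) < 2)]
  have htK := pv_two_tri (max (min n m - 1) 0)
  have hsK := pv_six_sqsum (max (min n m - 1) 0)
  have htJ := pv_two_tri (max ((min n m - 1) / 2) 0)
  have hsJ := pv_six_sqsum (max ((min n m - 1) / 2) 0)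
  have hc1 : (((max (min n m - 1) 0).toNat : Nat) : Int) = max (min n m - 1) 0 := by omega
  have hc2 : (((max ((min n m - 1) / 2) 0).toNat : Nat) : Int) = max ((min n m - 1) / 2) 0 := by omega
  have L1 := pvLoop1_eq n m (max (min n m - 1) 0).toNat (min n m - 1).toNat 1 0 (by omega) (by omega) (by omega)
  rw [hc1] at L1
  have L2 := pvLoop2_eq n m (max ((min n m - 1) / 2) 0).toNat (min n m - 2).toNat 2 0 (by omega) (by omega) (by omega)
  rw [hc2] at L2
  rw [pvLoop3_eq n m (max ((min n m - 1) / 2) 0).toNat (min n m - 2).toNat 2 (pvLoop2 n m (min n m - 2).toNat 2 0) (by omega) (by omega) (by omega),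
      hc2]
  by_cases hn : (5:Int) ≤ n <;> by_cases hm : (5:Int) ≤ m <;>
    simp only [hn, hm, if_true, if_false]
  · -- 5 ≤ n and 5 ≤ m
    have htn := pv_two_tri ((n - 1) / 2)
    have htm := pv_two_tri ((m - 1) / 2)
    rw [PySem.List.pyRange_of_pos 5 (n + 1) (by norm_num : (0:Int) < 2),
        PySem.List.pyRange_of_pos 5 (m + 1) (by norm_num : (0:Int) < 2),
        if_pos (by omega : (5:Int) < n + 1), if_pos (by omega : (5:Int) < m + 1),
        pvFold4_eq m 5 2 (by norm_num), pvFold4_eq n 5 2 (by norm_num)]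
    have hcn : (((n + 1 - 5 + 2 - 1) / 2).toNat : Int) = (n - 1) / 2 - 1 := by omega
    have hcm : (((m + 1 - 5 + 2 - 1) / 2).toNat : Int) = (m - 1) / 2 - 1 := by omega
    rw [hcn, hcm]
    linear_combination L1 + L2 + (24*(n+m)) * htK - 8 * hsK + (48*(n+m) + 48) * htJ
      - 32 * hsJ + 12 * htn + 12 * htm
  · -- 5 ≤ n only
    have htn := pv_two_tri ((n - 1) / 2)
    rw [PySem.List.pyRange_of_pos 5 (n + 1) (by norm_num : (0:Int) < 2),
        if_pos (by omega : (5:Int) < n + 1),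
        pvFold4_eq m 5 2 (by norm_num)]
    have hcn : (((n + 1 - 5 + 2 - 1) / 2).toNat : Int) = (n - 1) / 2 - 1 := by omega
    rw [hcn]
    linear_combination L1 + L2 + (24*(n+m)) * htK - 8 * hsK + (48*(n+m) + 48) * htJ
      - 32 * hsJ + 12 * htn
  · -- 5 ≤ m only
    have htm := pv_two_tri ((m - 1) / 2)
    rw [PySem.List.pyRange_of_pos 5 (m + 1) (by norm_num : (0:Int) < 2),
        if_pos (by omega : (5:Int) < m + 1),
        pvFold4_eq n 5 2 (by norm_num)]
    have hcm : (((m + 1 - 5 + 2 - 1) / 2).toNat : Int) = (m - 1) / 2 - 1 := by omega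
    rw [hcm]
    linear_combination L1 + L2 + (24*(n+m)) * htK - 8 * hsK + (48*(n+m) + 48) * htJ
      - 32 * hsJ + 12 * htm
  · linear_combination L1 + L2 + (24*(n+m)) * htK - 8 * hsK + (48*(n+m) + 48) * htJ
      - 32 * hsJ

-- ===== VERDICT (by name: the statement is the Claim_ definition above) =====
theorem count_bugles_spec : Claim_equal_count_bugles := by
  intro n m _
  unfold Spec_count_bugles
  exact pv_count_eq n m
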